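-- pv_equiv track=rewrite | github.com/dmitry957/codewars-training | kata/7-kyu/type-of-relation/solution.py | type_of_function
-- ===== SOURCE A (Python) =====
-- from collections import defaultdict
--
-- def type_of_function(domain, codomain, relations):
--     mapping = defaultdict(set)
--     for x, y in relations:
--         if x not in domain or y not in codomain:
--             continue
--         mapping[x].add(y)
--
--     for vals in mapping.values():
--         if len(vals) > 1:
--             return 'It is not a function'
--
--     if set(mapping.keys()) != set(domain):
--         return 'It is not a function'
--
--     reverse_mapping = defaultdict(set)
--     for x, y_set in mapping.items():
--         for y in y_set:
--             reverse_mapping[y].add(x)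
--
--     is_injective = all(len(v) == 1 for v in reverse_mapping.values())
--     is_surjective = set(reverse_mapping.keys()) == codomain
--
--     if is_injective and is_surjective:
--         return 'Bijective'
--     elif is_injective:
--         return 'Injective'
--     elif is_surjective:
--         return 'Surjective'
--     else:
--         return 'General function'
-- ===== SOURCE B (Python) =====
-- def type_of_function(domain, codomain, relations):
--     # Sort-based pipeline: no dictionary is ever built. Dedupe the valid pairs,
--     # then "it is a function" is ONE list equality: the sorted multiset of first
--     # components must equal sorted(set(domain)) (a duplicate x, i.e. two images,
--     # or a missing/extra key both break it). Injectivity is an adjacent-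
--     # duplicates scan over the sorted images; surjectivity compares the image
--     # set with the codomain.
--     pairs = {(x, y) for x, y in relations if x in domain and y in codomain}
--     xs = sorted(x for x, _ in pairs)
--     if xs != sorted(set(domain)):
--         return 'It is not a function'
--     ys = sorted(y for _, y in pairs)
--     injective = all(a < b for a, b in zip(ys, ys[1:]))
--     surjective = set(ys) == codomain
--     if injective and surjective:
--         return 'Bijective'
--     if injective:
--         return 'Injective'
--     if surjective:
--         return 'Surjective'
--     return 'General function'
-- ===== Notes on version B (the rewrite author's own statement) =====
-- stated objective: alternative
-- what changed: B builds no dictionary at all: it dedupes the valid pairs into a set, decides function-ness by one list equality (sorted first components vs sorted(set(domain)) - a duplicate x or a key mismatch both break it), decides injectivity by an adjacent-duplicates scan over the sorted images, and surjectivity by comparing the image set with the codomain; A's dict-of-sets forward map and full reverse index disappear.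
import Mathlib
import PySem

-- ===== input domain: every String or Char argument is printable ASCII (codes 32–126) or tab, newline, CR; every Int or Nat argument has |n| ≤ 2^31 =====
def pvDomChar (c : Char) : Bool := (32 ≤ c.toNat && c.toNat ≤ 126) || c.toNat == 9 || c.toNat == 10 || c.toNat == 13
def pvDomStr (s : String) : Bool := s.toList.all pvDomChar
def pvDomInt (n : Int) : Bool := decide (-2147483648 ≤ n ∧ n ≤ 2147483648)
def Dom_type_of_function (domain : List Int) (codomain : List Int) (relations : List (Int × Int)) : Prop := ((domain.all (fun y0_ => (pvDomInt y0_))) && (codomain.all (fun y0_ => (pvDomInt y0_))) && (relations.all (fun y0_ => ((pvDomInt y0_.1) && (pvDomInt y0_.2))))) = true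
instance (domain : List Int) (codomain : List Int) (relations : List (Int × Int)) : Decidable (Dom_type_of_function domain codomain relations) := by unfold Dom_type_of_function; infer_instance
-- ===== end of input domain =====

-- B replaces A's dict-of-sets plus reverse index with a sort-based pipeline that builds
-- no dictionary at all: dedupe the valid pairs, one list equality against sorted(set(domain))
-- decides function-ness, an adjacent-duplicates scan over the sorted images decides
-- injectivity. Objective: alternative (different algorithm, similar cost).

-- ===== PORT A =====
-- loop body: if x not in domain or y not in codomain: continue; mapping[x].add(y)  (mapping = defaultdict(set))
def stepA (domain : List Int) (codomain : List Int) (d : PySem.Dict Int (PySem.Set Int)) (p : Int × Int) : PySem.Dict Int (PySem.Set Int) :=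
  if !decide (p.1 ∈ domain) || !decide (p.2 ∈ codomain) then d
  else d.modify p.1 PySem.Set.empty (fun s => PySem.Set.add s p.2)

def tofAMap (domain : List Int) (codomain : List Int) (relations : List (Int × Int)) : PySem.Dict Int (PySem.Set Int) :=
  relations.foldl (stepA domain codomain) PySem.Dict.empty

-- reverse_mapping = defaultdict(set); for x, y_set in mapping.items(): for y in y_set: reverse_mapping[y].add(x)
def tofARev (m : PySem.Dict Int (PySem.Set Int)) : PySem.Dict Int (PySem.Set Int) :=
  m.items.foldl (fun rd kv =>
    kv.2.foldl (fun rd2 y => rd2.modify y PySem.Set.empty (fun s => PySem.Set.add s kv.1)) rd)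
    PySem.Dict.empty

def type_of_function (domain : List Int) (codomain : List Int) (relations : List (Int × Int)) : String :=
  let mapping := tofAMap domain codomain relations
  if mapping.values.any (fun vals => PySem.Set.len vals > 1) then "It is not a function"
  else if !PySem.Set.equal (PySem.Set.ofList mapping.keys) (PySem.Set.ofList domain) then "It is not a function"
  else
    let rd := tofARev mapping
    let is_injective := rd.values.all (fun v => PySem.Set.len v == 1)
    let is_surjective := PySem.Set.equal (PySem.Set.ofList rd.keys) codomain
    if is_injective && is_surjective then "Bijective"
    else if is_injective then "Injective"
    else if is_surjective then "Surjective"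
    else "General function"

-- ===== PORT B =====
-- pairs = {(x, y) for x, y in relations if x in domain and y in codomain}
def tofBPairs (domain : List Int) (codomain : List Int) (relations : List (Int × Int)) : PySem.Set (Int × Int) :=
  PySem.Set.ofList (relations.filter (fun p => decide (p.1 ∈ domain) && decide (p.2 ∈ codomain)))

def type_of_function_alt (domain : List Int) (codomain : List Int) (relations : List (Int × Int)) : String :=
  let pairs := tofBPairs domain codomain relations
  let xs := PySem.List.sorted (pairs.map Prod.fst) (fun x => x) false
  if !(xs == PySem.List.sorted (PySem.Set.ofList domain) (fun x => x) false) then "It is not a function"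
  else
    let ys := PySem.List.sorted (pairs.map Prod.snd) (fun y => y) false
    let injective := (ys.zip (PySem.List.slice ys (some 1) none)).all (fun p => decide (p.1 < p.2))
    let surjective := PySem.Set.equal (PySem.Set.ofList ys) codomain
    if injective && surjective then "Bijective"
    else if injective then "Injective"
    else if surjective then "Surjective"
    else "General function"

-- ===== PRECONDITION & SPEC =====
def Spec_type_of_function (domain : List Int) (codomain : List Int) (relations : List (Int × Int)) (out : String) : Prop := out = type_of_function_alt domain codomain relations
instance (domain : List Int) (codomain : List Int) (relations : List (Int × Int)) (out : String) : Decidable (Spec_type_of_function domain codomain relations out) := by unfold Spec_type_of_function; infer_instance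

-- ===== CLAIM (what is proved, stated in full; the proofs are below) =====
def Claim_equal_type_of_function : Prop := ∀ (domain : List Int) (codomain : List Int) (relations : List (Int × Int)), Dom_type_of_function domain codomain relations → Spec_type_of_function domain codomain relations (type_of_function domain codomain relations)

-- ===== LEMMAS AND PROOFS =====

-- the valid pairs, the common currency of both proofs
def tofV (domain : List Int) (codomain : List Int) (relations : List (Int × Int)) : List (Int × Int) :=
  relations.filter (fun p => decide (p.1 ∈ domain) && decide (p.2 ∈ codomain))

-- one step of the dict-of-sets fold, keyed by the pair's first component
def pairStep (d : PySem.Dict Int (PySem.Set Int)) (p : Int × Int) : PySem.Dict Int (PySem.Set Int) :=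
  d.modify p.1 PySem.Set.empty (fun s => PySem.Set.add s p.2)

theorem pvSetLen_eq (v : PySem.Set Int) : PySem.Set.len v = (v.length : Int) := rfl

theorem stepA_eq (domain codomain : List Int) (d : PySem.Dict Int (PySem.Set Int)) (p : Int × Int) :
    stepA domain codomain d p =
      if (decide (p.1 ∈ domain) && decide (p.2 ∈ codomain)) = true
      then pairStep d p else d := by
  unfold stepA pairStep
  by_cases h1 : p.1 ∈ domain <;> by_cases h2 : p.2 ∈ codomain <;> simp [h1, h2]

theorem foldA_eq_filter (domain codomain : List Int) (l : List (Int × Int)) :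
    ∀ d, l.foldl (stepA domain codomain) d
      = (l.filter (fun p => decide (p.1 ∈ domain) && decide (p.2 ∈ codomain))).foldl pairStep d := by
  induction l with
  | nil => intro d; rfl
  | cons p rest ih =>
    intro d
    rw [List.foldl_cons, stepA_eq]
    by_cases hg : (decide (p.1 ∈ domain) && decide (p.2 ∈ codomain)) = true
    · rw [if_pos hg, show (List.filter (fun p => decide (p.1 ∈ domain) && decide (p.2 ∈ codomain)) (p :: rest)) = p :: (List.filter (fun p => decide (p.1 ∈ domain) && decide (p.2 ∈ codomain)) rest) from List.filter_cons_of_pos hg, List.foldl_cons, ih]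
    · rw [if_neg hg, show (List.filter (fun p => decide (p.1 ∈ domain) && decide (p.2 ∈ codomain)) (p :: rest)) = (List.filter (fun p => decide (p.1 ∈ domain) && decide (p.2 ∈ codomain)) rest) from List.filter_cons_of_neg (by simpa using hg), ih]

theorem pairFold_getD (ps : List (Int × Int)) :
    ∀ (d : PySem.Dict Int (PySem.Set Int)) (x : Int),
      ((ps.foldl pairStep d).getD x PySem.Set.empty)
        = PySem.Set.update (d.getD x PySem.Set.empty) ((ps.filter (fun p => p.1 == x)).map Prod.snd) := by
  induction ps with
  | nil => intro d x; simp [PySem.Set.update_nil]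
  | cons p rest ih =>
    intro d x
    rw [List.foldl_cons]
    by_cases hp : p.1 = x
    · rw [List.filter_cons_of_pos (by simp [hp]), List.map_cons, PySem.Set.update_cons, ih]
      congr 1
      unfold pairStep
      rw [PySem.Dict.getD_modify, if_pos hp.symm, hp]
    · rw [List.filter_cons_of_neg (by simp [hp]), ih]
      congr 1
      unfold pairStep
      rw [PySem.Dict.getD_modify, if_neg (fun h => hp h.symm)]

theorem pairFold_keys (ps : List (Int × Int)) (d : PySem.Dict Int (PySem.Set Int)) :
    (ps.foldl pairStep d).keys = PySem.Set.update d.keys (ps.map Prod.fst) := by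
  exact PySem.Dict.keys_foldl_modify_key ps Prod.fst PySem.Set.empty
    (fun _ p => fun s => PySem.Set.add s p.2) d

-- a list all of whose elements are equal collapses to a singleton set
theorem ofList_all_eq {l : List Int} {y : Int} (hne : l ≠ []) (h : ∀ a ∈ l, a = y) :
    PySem.Set.ofList l = [y] := by
  induction l with
  | nil => exact absurd rfl hne
  | cons a t ih =>
    rw [PySem.Set.ofList_cons, h a (by simp)]
    have ht : (PySem.Set.ofList t).discard y = [] := by
      unfold PySem.Set.discard
      rw [List.filter_eq_nil_iff]
      intro b hb
      have : b = y := h b (by simp [(PySem.Set.mem_ofList t b).mp hb])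
      simp [this]
    rw [ht]

theorem headD_eq_of_all_eq {l : List Int} {a : Int} (d : Int)
    (h : ∀ x ∈ l, ∀ y ∈ l, x = y) (ha : a ∈ l) : a = l.headD d := by
  cases l with
  | nil => simp at ha
  | cons b t => exact h a ha b (by simp)

theorem two_le_length_of_two_mem {l : List Int} {a b : Int}
    (ha : a ∈ l) (hb : b ∈ l) (hne : a ≠ b) : 2 ≤ l.length := by
  match l with
  | [] => simp at ha
  | [x] =>
    simp at ha hb
    subst ha; subst hb; exact absurd rfl hne
  | x :: y :: t => simp

-- adjacent-pairs scan on a weakly sorted list decides Nodup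
theorem zip_all_lt_iff_nodup : ∀ (ys : List Int), ys.Pairwise (· ≤ ·) →
    (((ys.zip ys.tail).all (fun p => decide (p.1 < p.2)) = true) ↔ ys.Nodup) := by
  intro ys
  induction ys with
  | nil => intro _; simp
  | cons a t ih =>
    intro hp
    cases t with
    | nil => simp
    | cons b t' =>
      have hp' : (b :: t').Pairwise (· ≤ ·) := hp.tail
      have hab : a ≤ b := (List.pairwise_cons.mp hp).1 b (by simp)
      have hbt : ∀ x ∈ t', b ≤ x := fun x hx => (List.pairwise_cons.mp hp').1 x hx
      have hzip : ((a :: b :: t').zip (a :: b :: t').tail)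
          = (a, b) :: ((b :: t').zip (b :: t').tail) := by simp
      rw [hzip, List.all_cons, Bool.and_eq_true, ih hp']
      constructor
      · rintro ⟨h1, h2⟩
        have halt : a < b := by simpa using h1
        rw [List.nodup_cons]
        refine ⟨?_, h2⟩
        intro hmem
        rcases List.mem_cons.mp hmem with h | h
        · omega
        · have := hbt a h; omega
      · intro h
        rcases List.nodup_cons.mp h with ⟨hnm, h2⟩
        have : a ≠ b := fun he => hnm (he ▸ List.mem_cons_self ..)
        refine ⟨by simp; omega, h2⟩

-- the unique image of each key (in the no-conflict case)
def tofF (V : List (Int × Int)) (k : Int) : Int :=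
  ((V.filter (fun p => p.1 == k)).map Prod.snd).headD 0

theorem mem_snds_self {V : List (Int × Int)} {p : Int × Int} (hp : p ∈ V) :
    p.2 ∈ (V.filter (fun q => q.1 == p.1)).map Prod.snd :=
  List.mem_map_of_mem (List.mem_filter.mpr ⟨hp, by simp⟩)

-- ===== VERDICT (by name: the statement is the Claim_ definition above) =====
theorem type_of_function_spec : Claim_equal_type_of_function := by
  intro domain codomain relations _
  unfold Spec_type_of_function type_of_function type_of_function_alt tofAMap tofBPairs
  rw [foldA_eq_filter]
  set V := relations.filter (fun p => decide (p.1 ∈ domain) && decide (p.2 ∈ codomain)) with hV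
  set M := V.foldl pairStep PySem.Dict.empty with hM
  set S := PySem.Set.ofList V with hS
  set K0 := PySem.Set.ofList (V.map Prod.fst) with hK0
  have hMkeys : M.keys = K0 := by
    rw [hM, pairFold_keys, PySem.Dict.keys_empty, PySem.Set.update_nil_left]
  have hMget : ∀ x, M.getD x PySem.Set.empty
      = PySem.Set.ofList ((V.filter (fun q => q.1 == x)).map Prod.snd) := by
    intro x
    rw [hM, pairFold_getD, PySem.Dict.getD_empty, PySem.Set.update_empty]
  have hKnd : M.keys.Nodup := by rw [hMkeys]; exact PySem.Set.nodup_ofList _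
  by_cases hP : ∀ p ∈ V, ∀ q ∈ V, p.1 = q.1 → p = q
  · -- no key has two images: both programs run the full classification
    have hsnd : ∀ p ∈ V, p.2 = tofF V p.1 := by
      intro p hp
      exact headD_eq_of_all_eq 0 (by
        intro x hx y hy
        obtain ⟨px, hpx, rfl⟩ := List.mem_map.mp hx
        obtain ⟨py, hpy, rfl⟩ := List.mem_map.mp hy
        obtain ⟨hpxV, hpx1⟩ := List.mem_filter.mp hpx
        obtain ⟨hpyV, hpy1⟩ := List.mem_filter.mp hpy
        simp only [beq_iff_eq] at hpx1 hpy1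
        rw [hP px hpxV py hpyV (hpx1.trans hpy1.symm)]) (mem_snds_self hp)
    have hsing : ∀ k ∈ V.map Prod.fst, M.getD k PySem.Set.empty = [tofF V k] := by
      intro k hk
      obtain ⟨p, hpV, rfl⟩ := List.mem_map.mp hk
      rw [hMget]
      apply ofList_all_eq
      · intro h0
        have := mem_snds_self hpV
        rw [h0] at this
        simp at this
      · intro a ha
        obtain ⟨q, hq, rfl⟩ := List.mem_map.mp ha
        obtain ⟨hqV, hq1⟩ := List.mem_filter.mp hq
        simp only [beq_iff_eq] at hq1
        rw [hsnd q hqV, hq1]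
    have hanyF : (M.values.any (fun vals => decide (PySem.Set.len vals > 1))) = false := by
      rw [List.any_eq_false]
      intro v hv
      rw [PySem.Dict.values_eq_map_keys M hKnd PySem.Set.empty] at hv
      obtain ⟨k, hk, rfl⟩ := List.mem_map.mp hv
      rw [hMkeys, hK0, PySem.Set.mem_ofList] at hk
      rw [hsing k hk, pvSetLen_eq]
      simp
    have hmemK : ∀ x, x ∈ S.map Prod.fst ↔ x ∈ V.map Prod.fst := by
      intro x
      simp [hS, List.mem_map, PySem.Set.mem_ofList]
    have hSfstnd : (S.map Prod.fst).Nodup := by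
      apply List.Nodup.map_on ?_ (PySem.Set.nodup_ofList V)
      intro p hp q hq h1
      exact hP p ((PySem.Set.mem_ofList V p).mp hp) q ((PySem.Set.mem_ofList V q).mp hq) h1
    have hcheck : (PySem.Set.equal (PySem.Set.ofList M.keys) (PySem.Set.ofList domain))
        = ((PySem.List.sorted (S.map Prod.fst) (fun x => x) false)
            == (PySem.List.sorted (PySem.Set.ofList domain) (fun x => x) false)) := by
      rw [Bool.eq_iff_iff, beq_iff_eq, PySem.List.sorted_id_eq_sorted_id_iff_perm,
          List.perm_ext_iff_of_nodup hSfstnd (PySem.Set.nodup_ofList domain),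
          PySem.Set.equal_iff]
      have hpt : ∀ x : Int, (x ∈ PySem.Set.ofList M.keys ↔ x ∈ PySem.Set.ofList domain)
          ↔ (x ∈ S.map Prod.fst ↔ x ∈ PySem.Set.ofList domain) := by
        intro x
        rw [PySem.Set.mem_ofList, hMkeys, hK0, PySem.Set.mem_ofList, ← hmemK x]
      exact ⟨fun h x => (hpt x).mp (h x), fun h x => (hpt x).mpr (h x)⟩
    -- the pair set is the graph of tofF over the key set
    have hK0gnd : (K0.map (fun k => (k, tofF V k))).Nodup :=
      List.Nodup.map (fun a b h => congrArg Prod.fst h) (PySem.Set.nodup_ofList _)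
    have hSperm : S.Perm (K0.map (fun k => (k, tofF V k))) := by
      rw [List.perm_ext_iff_of_nodup (PySem.Set.nodup_ofList V) hK0gnd]
      intro p
      rw [PySem.Set.mem_ofList]
      constructor
      · intro hp
        refine List.mem_map.mpr ⟨p.1, ?_, ?_⟩
        · rw [hK0, PySem.Set.mem_ofList]
          exact List.mem_map_of_mem hp
        · rw [← hsnd p hp]
      · intro hp
        obtain ⟨k, hk, rfl⟩ := List.mem_map.mp hp
        rw [hK0, PySem.Set.mem_ofList] at hk
        obtain ⟨q, hqV, rfl⟩ := List.mem_map.mp hk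
        have : q = (q.1, tofF V q.1) := by rw [← hsnd q hqV]
        rw [← this]
        exact hqV
    have hsndperm : (S.map Prod.snd).Perm (K0.map (tofF V)) := by
      simpa [List.map_map, Function.comp] using hSperm.map Prod.snd
    -- A's reverse index collapses
    have hitems : M.items = K0.map (fun k => (k, ([tofF V k] : PySem.Set Int))) := by
      rw [PySem.Dict.items_eq_map_keys M hKnd PySem.Set.empty, hMkeys]
      apply List.map_congr_left
      intro k hk
      rw [hsing k (by rw [hK0, PySem.Set.mem_ofList] at hk; exact hk)]
    have hrd : tofARev M = (K0.map (fun k => (tofF V k, k))).foldl pairStep PySem.Dict.empty := by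
      unfold tofARev
      rw [hitems, List.foldl_map, List.foldl_map]
      rfl
    have hrdkeys : (tofARev M).keys = PySem.Set.ofList (K0.map (tofF V)) := by
      rw [hrd, pairFold_keys, PySem.Dict.keys_empty, PySem.Set.update_nil_left, List.map_map]
      rfl
    have hrdnd : (tofARev M).keys.Nodup := by
      rw [hrdkeys]; exact PySem.Set.nodup_ofList _
    have hrdget : ∀ y, (tofARev M).getD y PySem.Set.empty
        = K0.filter (fun k => tofF V k == y) := by
      intro y
      rw [hrd, pairFold_getD, PySem.Dict.getD_empty, PySem.Set.update_empty, List.filter_map,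
          List.map_map]
      simp only [Function.comp_def]
      rw [List.map_id']
      exact PySem.Set.ofList_eq_self_of_nodup _
        ((PySem.Set.nodup_ofList (V.map Prod.fst)).filter _)
    have hinjA : ((tofARev M).values.all (fun v => PySem.Set.len v == 1)) = true
        ↔ (K0.map (tofF V)).Nodup := by
      rw [List.all_eq_true]
      constructor
      · intro h
        rw [List.nodup_iff_count_eq_one]
        intro y hy
        have hyk : y ∈ (tofARev M).keys := by
          rw [hrdkeys, PySem.Set.mem_ofList]; exact hy
        have hv := h _ (by
          rw [PySem.Dict.values_eq_map_keys _ hrdnd PySem.Set.empty]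
          exact List.mem_map_of_mem hyk)
        rw [hrdget, pvSetLen_eq] at hv
        have hlen1 : (K0.filter (fun k => tofF V k == y)).length = 1 := by simpa using hv
        rw [List.count_eq_countP, List.countP_map, ← List.countP_eq_length_filter] at *
        convert hlen1 using 2
      · intro h v hv
        rw [PySem.Dict.values_eq_map_keys _ hrdnd PySem.Set.empty] at hv
        obtain ⟨y, hy, rfl⟩ := List.mem_map.mp hv
        rw [hrdkeys, PySem.Set.mem_ofList] at hy
        rw [hrdget, pvSetLen_eq]
        have hc1 : List.count y (K0.map (tofF V)) = 1 := List.nodup_iff_count_eq_one.mp h y hy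
        rw [List.count_eq_countP, List.countP_map] at hc1
        have hf : (K0.filter (fun k => tofF V k == y)).length = 1 := by
          rw [← List.countP_eq_length_filter]
          exact hc1
        simp [hf]
    have hysperm : (PySem.List.sorted (S.map Prod.snd) (fun y => y) false).Perm
        (K0.map (tofF V)) :=
      (PySem.List.sorted_perm (S.map Prod.snd) (fun y => y) false).trans hsndperm
    have hinjB : (((PySem.List.sorted (S.map Prod.snd) (fun y => y) false).zip
          (PySem.List.slice (PySem.List.sorted (S.map Prod.snd) (fun y => y) false) (some 1) none)).all
            (fun p => decide (p.1 < p.2)) = true)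
        ↔ (K0.map (tofF V)).Nodup := by
      rw [PySem.List.slice_from_one,
          zip_all_lt_iff_nodup _ (PySem.List.sorted_pairwise (S.map Prod.snd) (fun y => y))]
      exact hysperm.nodup_iff
    have hinj : ((tofARev M).values.all (fun v => PySem.Set.len v == 1))
        = (((PySem.List.sorted (S.map Prod.snd) (fun y => y) false).zip
            (PySem.List.slice (PySem.List.sorted (S.map Prod.snd) (fun y => y) false) (some 1) none)).all
              (fun p => decide (p.1 < p.2))) := by
      rw [Bool.eq_iff_iff, hinjA, hinjB]
    have hsurj : PySem.Set.equal (PySem.Set.ofList (tofARev M).keys) codomain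
        = PySem.Set.equal
            (PySem.Set.ofList (PySem.List.sorted (S.map Prod.snd) (fun y => y) false)) codomain := by
      rw [Bool.eq_iff_iff, PySem.Set.equal_iff, PySem.Set.equal_iff]
      have hpt : ∀ x : Int, x ∈ PySem.Set.ofList (tofARev M).keys
          ↔ x ∈ PySem.Set.ofList (PySem.List.sorted (S.map Prod.snd) (fun y => y) false) := by
        intro x
        rw [PySem.Set.mem_ofList, PySem.Set.mem_ofList, hrdkeys, PySem.Set.mem_ofList,
            hysperm.mem_iff]
      exact ⟨fun h x => (hpt x).symm.trans (h x), fun h x => (hpt x).trans (h x)⟩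
    simp only [hanyF, Bool.false_eq_true, if_false, hcheck, hinj, hsurj]
  · -- some key has two distinct images: both programs say "It is not a function"
    push Not at hP
    obtain ⟨p, hpV, q, hqV, hpq1, hpqne⟩ := hP
    have hsne : p.2 ≠ q.2 := fun h => hpqne (Prod.ext hpq1 h)
    have hany : (M.values.any (fun vals => decide (PySem.Set.len vals > 1))) = true := by
      rw [List.any_eq_true]
      refine ⟨M.getD p.1 PySem.Set.empty, ?_, ?_⟩
      · rw [PySem.Dict.values_eq_map_keys M hKnd PySem.Set.empty]
        apply List.mem_map_of_mem
        rw [hMkeys, hK0, PySem.Set.mem_ofList]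
        exact List.mem_map_of_mem hpV
      · rw [hMget, pvSetLen_eq]
        have hp2 : p.2 ∈ PySem.Set.ofList ((V.filter (fun r => r.1 == p.1)).map Prod.snd) := by
          rw [PySem.Set.mem_ofList]
          exact mem_snds_self hpV
        have hq2 : q.2 ∈ PySem.Set.ofList ((V.filter (fun r => r.1 == p.1)).map Prod.snd) := by
          rw [PySem.Set.mem_ofList]
          exact List.mem_map_of_mem (List.mem_filter.mpr ⟨hqV, by simp [hpq1]⟩)
        have := two_le_length_of_two_mem hp2 hq2 hsne
        simp only [decide_eq_true_eq]
        exact_mod_cast Nat.lt_of_lt_of_le Nat.one_lt_two this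
    have hne : ((PySem.List.sorted (S.map Prod.fst) (fun x => x) false)
        == (PySem.List.sorted (PySem.Set.ofList domain) (fun x => x) false)) = false := by
      rw [Bool.eq_false_iff]
      intro h
      rw [beq_iff_eq, PySem.List.sorted_id_eq_sorted_id_iff_perm] at h
      have hnd : (S.map Prod.fst).Nodup := h.nodup_iff.mpr (PySem.Set.nodup_ofList domain)
      exact hpqne (List.inj_on_of_nodup_map hnd
        ((PySem.Set.mem_ofList V p).mpr hpV) ((PySem.Set.mem_ofList V q).mpr hqV) hpq1)
    simp only [hany, if_true, hne, Bool.not_false, if_true]
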